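-- pv_equiv track=rewrite | github.com/madhav-gfn/teacher_ji | backend/rag/ingest.py | rebalance_small_chunks
-- ===== SOURCE A (Python) =====
-- MIN_CHARS = 200
--
-- MAX_CHARS = 800
--
-- def find_balanced_boundary(text: str) -> int:
--     max_first = min(MAX_CHARS, len(text) - MIN_CHARS)
--     if max_first < MIN_CHARS:
--         return max_first
--
--     for idx in range(max_first, MIN_CHARS - 1, -1):
--         if text[idx] in ".!?":
--             return idx + 1
--
--     for idx in range(max_first, MIN_CHARS - 1, -1):
--         if text[idx].isspace():
--             return idx
--
--     return max_first
--
-- def rebalance_small_chunks(chunks: list[str]) -> list[str]: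
--     balanced = [chunk.strip() for chunk in chunks if chunk.strip()]
--     idx = 1
--
--     while idx < len(balanced):
--         current = balanced[idx]
--         if len(current) >= MIN_CHARS:
--             idx += 1
--             continue
--
--         combined = f"{balanced[idx - 1]}\n\n{current}".strip()
--         if len(combined) <= MAX_CHARS:
--             balanced[idx - 1] = combined
--             del balanced[idx]
--             continue
--
--         boundary = find_balanced_boundary(combined)
--         if MIN_CHARS <= boundary <= MAX_CHARS:
--             left = combined[:boundary].strip()
--             right = combined[boundary:].strip()
--             if (
--                 left
--                 and right
--                 and len(left) >= MIN_CHARS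
--                 and len(left) <= MAX_CHARS
--                 and len(right) >= MIN_CHARS
--                 and len(right) <= MAX_CHARS
--             ):
--                 balanced[idx - 1] = left
--                 balanced[idx] = right
--                 idx += 1
--                 continue
--
--         idx += 1
--
--     return balanced
-- ===== SOURCE B (Python) =====
-- MIN_CHARS = 200
--
-- MAX_CHARS = 800
--
--
-- def find_balanced_boundary(text: str) -> int:
--     # single ascending pass remembering the last sentence-end and last whitespace
--     max_first = min(MAX_CHARS, len(text) - MIN_CHARS)
--     if max_first < MIN_CHARS:
--         return max_first
--
--     punct = -1
--     space = -1
--     for i in range(MIN_CHARS, max_first + 1):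
--         ch = text[i]
--         if ch in ".!?":
--             punct = i
--         elif ch.isspace():
--             space = i
--
--     if punct >= 0:
--         return punct + 1
--     if space >= 0:
--         return space
--     return max_first
--
--
-- def rebalance_small_chunks(chunks: list[str]) -> list[str]:
--     # one forward pass with an output stack: merge a small chunk into the stack
--     # top (or split the merge) instead of deleting from the list being scanned
--     out: list[str] = []
--     for chunk in chunks:
--         c = chunk.strip()
--         if not c:
--             continue
--         if not out or len(c) >= MIN_CHARS:
--             out.append(c)
--             continue
--         combined = f"{out[-1]}\n\n{c}".strip()
--         if len(combined) <= MAX_CHARS: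
--             out[-1] = combined
--             continue
--         boundary = find_balanced_boundary(combined)
--         if MIN_CHARS <= boundary <= MAX_CHARS:
--             left = combined[:boundary].strip()
--             right = combined[boundary:].strip()
--             if (
--                 left
--                 and right
--                 and MIN_CHARS <= len(left) <= MAX_CHARS
--                 and MIN_CHARS <= len(right) <= MAX_CHARS
--             ):
--                 out[-1] = left
--                 out.append(right)
--                 continue
--         out.append(c)
--     return out
-- ===== Notes on version B (the rewrite author's own statement) =====
-- stated objective: faster
-- what changed: Replaces A's index-driven while loop that mutates the list in place (del shifts every later element, and merged chunks are re-scanned) with a single forward pass that pushes each stripped chunk onto an output stack, merging into or splitting the stack top; the boundary helper's two descending scans become one ascending scan tracking the last sentence-end and last space.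
import Mathlib
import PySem

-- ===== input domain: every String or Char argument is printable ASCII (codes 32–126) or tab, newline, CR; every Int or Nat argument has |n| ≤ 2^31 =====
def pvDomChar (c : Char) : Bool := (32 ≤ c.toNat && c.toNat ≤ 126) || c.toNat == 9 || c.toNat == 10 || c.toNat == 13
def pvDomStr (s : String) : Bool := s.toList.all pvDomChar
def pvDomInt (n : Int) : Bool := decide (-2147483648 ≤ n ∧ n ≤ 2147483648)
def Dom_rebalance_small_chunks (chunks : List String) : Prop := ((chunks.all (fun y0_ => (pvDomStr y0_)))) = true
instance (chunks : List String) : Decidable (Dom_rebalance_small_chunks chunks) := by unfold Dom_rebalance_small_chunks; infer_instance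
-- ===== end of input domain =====

-- B replaces A's quadratic while-loop with in-place `del` by a single forward pass
-- over the chunks that merges into / splits the top of an output stack (alternative
-- single-pass algorithm; the boundary helper becomes one ascending scan).


-- ===== PORT A =====
-- find_balanced_boundary: the two descending for-loops with early return, ported as List.find?
def pvFindBoundaryA (text : String) : Int :=
  let max_first : Int := min 800 (PySem.Str.len text - 200)
  if max_first < 200 then max_first
  else
    match (PySem.List.pyRange max_first 199 (-1)).find?
        (fun i => match PySem.Str.pyGet? text i with
          | some ch => PySem.Chars.isIn [ch] ".!?".toList
          | none => false) with
    | some i => i + 1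
    | none =>
      match (PySem.List.pyRange max_first 199 (-1)).find?
          (fun i => match PySem.Str.pyGet? text i with
            | some ch => PySem.Chars.isspace ch
            | none => false) with
      | some i => i
      | none => max_first

-- the while-loop of A over the list `balanced` and index `idx`
-- (every read index is in range under the loop guard and idx ≥ 1, so getD is exact)
def pvLoopA (balanced : List String) (idx : Nat) : List String :=
  if h : idx < balanced.length then
    let current := balanced.getD idx ""
    if 200 ≤ PySem.Str.len current then pvLoopA balanced (idx + 1)
    else
      let combined := PySem.Str.strip (balanced.getD (idx - 1) "" ++ "\n\n" ++ current)
      if PySem.Str.len combined ≤ 800 then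
        pvLoopA ((balanced.set (idx - 1) combined).eraseIdx idx) idx
      else
        let boundary := pvFindBoundaryA combined
        if 200 ≤ boundary ∧ boundary ≤ 800 then
          let left := PySem.Str.strip (PySem.Str.slice combined none (some boundary))
          let right := PySem.Str.strip (PySem.Str.slice combined (some boundary) none)
          if left ≠ "" ∧ right ≠ "" ∧ 200 ≤ PySem.Str.len left ∧ PySem.Str.len left ≤ 800 ∧
              200 ≤ PySem.Str.len right ∧ PySem.Str.len right ≤ 800 then
            pvLoopA ((balanced.set (idx - 1) left).set idx right) (idx + 1)
          else pvLoopA balanced (idx + 1)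
        else pvLoopA balanced (idx + 1)
  else balanced
termination_by balanced.length - idx
decreasing_by all_goals first
  | omega
  | (simp [List.length_set, List.length_eraseIdx, h]; omega)

def rebalance_small_chunks (chunks : List String) : List String :=
  let balanced := (chunks.map (fun c => PySem.Str.strip c)).filter (fun c => c ≠ "")
  pvLoopA balanced 1

-- ===== PORT B =====
-- find_balanced_boundary (B): one ascending scan remembering the last sentence end and last space
def pvFindBoundaryB (text : String) : Int :=
  let max_first : Int := min 800 (PySem.Str.len text - 200)
  if max_first < 200 then max_first
  else
    let ps := (PySem.List.pyRange 200 (max_first + 1)).foldl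
      (fun (st : Int × Int) i =>
        match PySem.Str.pyGet? text i with
        | some ch =>
          if PySem.Chars.isIn [ch] ".!?".toList then (i, st.2)
          else if PySem.Chars.isspace ch then (st.1, i)
          else st
        | none => st) (-1, -1)
    if 0 ≤ ps.1 then ps.1 + 1
    else if 0 ≤ ps.2 then ps.2
    else max_first

-- B's loop body after the `continue` for empty stripped chunks
def pvStepCore (out : List String) (c : String) : List String :=
  if out = [] ∨ 200 ≤ PySem.Str.len c then out ++ [c]
  else
    let combined := PySem.Str.strip (out.getLastD "" ++ "\n\n" ++ c)
    if PySem.Str.len combined ≤ 800 then out.dropLast ++ [combined]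
    else
      let boundary := pvFindBoundaryB combined
      if 200 ≤ boundary ∧ boundary ≤ 800 then
        let left := PySem.Str.strip (PySem.Str.slice combined none (some boundary))
        let right := PySem.Str.strip (PySem.Str.slice combined (some boundary) none)
        if left ≠ "" ∧ right ≠ "" ∧ 200 ≤ PySem.Str.len left ∧ PySem.Str.len left ≤ 800 ∧
            200 ≤ PySem.Str.len right ∧ PySem.Str.len right ≤ 800 then
          out.dropLast ++ [left, right]
        else out ++ [c]
      else out ++ [c]

def pvStepB (out : List String) (chunk : String) : List String :=
  let c := PySem.Str.strip chunk
  if c = "" then out else pvStepCore out c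

def rebalance_small_chunks_alt (chunks : List String) : List String :=
  chunks.foldl pvStepB []

-- ===== PRECONDITION & SPEC =====
def Spec_rebalance_small_chunks (chunks : List String) (out : List String) : Prop := out = rebalance_small_chunks_alt chunks
instance (chunks : List String) (out : List String) : Decidable (Spec_rebalance_small_chunks chunks out) := by unfold Spec_rebalance_small_chunks; infer_instance

-- ===== CLAIM (what is proved, stated in full; the proofs are below) =====
def Claim_equal_rebalance_small_chunks : Prop := ∀ (chunks : List String), Dom_rebalance_small_chunks chunks → Spec_rebalance_small_chunks chunks (rebalance_small_chunks chunks)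

-- ===== LEMMAS AND PROOFS =====

-- B's paired fold computes the LAST index satisfying each predicate (elif-style)
theorem pvFoldPair (p q : Int → Bool) (l : List Int) : ∀ s : Int × Int,
    l.foldl (fun st i => if p i then (i, st.2) else if q i then (st.1, i) else st) s
      = ((l.reverse.find? p).getD s.1, (l.reverse.find? (fun i => !p i && q i)).getD s.2) := by
  induction l with
  | nil => intro s; simp
  | cons x l ih =>
    intro s
    simp only [List.foldl_cons, ih, List.reverse_cons, List.find?_append]
    cases hp : l.reverse.find? p <;>
      cases hq : l.reverse.find? (fun i => !p i && q i) <;>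
        by_cases hx : p x = true <;> by_cases hqx : q x = true <;>
          simp [List.find?, hx, hqx, Option.or]

theorem pvFindBoundary_eq (text : String) : pvFindBoundaryA text = pvFindBoundaryB text := by
  have hPQ :
      (fun i => !(match PySem.Str.pyGet? text i with
          | some ch => PySem.Chars.isIn [ch] ".!?".toList
          | none => false) &&
        (match PySem.Str.pyGet? text i with
          | some ch => PySem.Chars.isspace ch
          | none => false))
      = (fun i => match PySem.Str.pyGet? text i with
          | some ch => PySem.Chars.isspace ch
          | none => false) := by
    funext i
    cases hg : PySem.Str.pyGet? text i with
    | none => simp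
    | some ch =>
      simp only []
      by_cases hin : PySem.Chars.isIn [ch] ".!?".toList = true
      · have hmem : ch ∈ ".!?".toList :=
          (List.singleton_infix_iff ch _).mp ((PySem.Chars.isIn_iff_infix _ _).mp hin)
        have : PySem.Chars.isspace ch = false := by
          rcases (by simpa using hmem : ch = '.' ∨ ch = '!' ∨ ch = '?') with rfl | rfl | rfl <;> decide
        simp [this]
      · rw [show (".!?".toList) = ['.', '!', '?'] from rfl] at hin
        simp [Bool.eq_false_iff.mpr hin]
  have hbody :
      (fun (st : Int × Int) i =>
        match PySem.Str.pyGet? text i with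
        | some ch =>
          if PySem.Chars.isIn [ch] ".!?".toList then (i, st.2)
          else if PySem.Chars.isspace ch then (st.1, i)
          else st
        | none => st)
      = (fun (st : Int × Int) i =>
          if (match PySem.Str.pyGet? text i with
              | some ch => PySem.Chars.isIn [ch] ".!?".toList
              | none => false) then (i, st.2)
          else if (match PySem.Str.pyGet? text i with
              | some ch => PySem.Chars.isspace ch
              | none => false) then (st.1, i)
          else st) := by
    funext st i
    cases hg : PySem.Str.pyGet? text i <;> simp
  simp only [pvFindBoundaryA, pvFindBoundaryB]
  by_cases hlt : min 800 (PySem.Str.len text - 200) < 200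
  · rw [if_pos hlt, if_pos hlt]
  · rw [if_neg hlt, if_neg hlt, hbody, pvFoldPair]
    have h199 : PySem.List.pyRange (min 800 (PySem.Str.len text - 200)) 199 (-1)
        = (PySem.List.pyRange 200 (min 800 (PySem.Str.len text - 200) + 1)).reverse := by
      rw [PySem.List.pyRange_neg_one_eq_reverse]; norm_num
    rw [h199, hPQ]
    cases hp : (PySem.List.pyRange 200 (min 800 (PySem.Str.len text - 200) + 1)).reverse.find?
        (fun i => match PySem.Str.pyGet? text i with
          | some ch => PySem.Chars.isIn [ch] ".!?".toList
          | none => false) with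
    | some i =>
      have hi : (200 : Int) ≤ i := by
        have hm := List.mem_reverse.mp (List.mem_of_find?_eq_some hp)
        exact ((PySem.List.mem_pyRange_one).mp hm).1
      simp [Option.getD, show (0:Int) ≤ i by omega]
    | none =>
      cases hq : (PySem.List.pyRange 200 (min 800 (PySem.Str.len text - 200) + 1)).reverse.find?
          (fun i => match PySem.Str.pyGet? text i with
            | some ch => PySem.Chars.isspace ch
            | none => false) with
      | some i =>
        have hi : (200 : Int) ≤ i := by
          have hm := List.mem_reverse.mp (List.mem_of_find?_eq_some hq)
          exact ((PySem.List.mem_pyRange_one).mp hm).1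
        simp [show (0:Int) ≤ i by omega]
      | none => simp


-- list-surgery facts used to read A's mutations as stack operations
theorem pvGetD_mid (out rest : List String) (c : String) :
    (out ++ c :: rest).getD out.length "" = c := by
  simp [List.getD_eq_getElem?_getD]

theorem pvGetD_prev (out rest : List String) (h : out ≠ []) :
    (out ++ rest).getD (out.length - 1) "" = out.getLastD "" := by
  have hl : out.length - 1 < out.length := by
    cases out with
    | nil => exact absurd rfl h
    | cons a t => simp
  rw [List.getD_eq_getElem?_getD, List.getElem?_append, if_pos hl, List.getLastD_eq_getLast?,
    List.getLast?_eq_getElem?]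

theorem pvSet_last (l : List String) (v : String) (h : l ≠ []) :
    l.set (l.length - 1) v = l.dropLast ++ [v] := by
  induction l with
  | nil => simp at h
  | cons x t ih =>
    cases t with
    | nil => simp
    | cons y t' => simpa using ih (by simp)

theorem pvEraseIdx_boundary (l₁ l₂ : List String) :
    (l₁ ++ l₂).eraseIdx l₁.length = l₁ ++ l₂.eraseIdx 0 := by
  induction l₁ with
  | nil => simp
  | cons x t ih => simpa using ih

-- the invariant: A's loop at index out.length on out ++ rest is B's fold of rest from out
theorem pvLoop_eq (rest : List String) : ∀ out : List String, out ≠ [] →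
    pvLoopA (out ++ rest) out.length = rest.foldl pvStepCore out := by
  induction rest with
  | nil =>
    intro out h
    rw [List.append_nil, pvLoopA, dif_neg (lt_irrefl out.length)]
    rfl
  | cons c rest ih =>
    intro out h
    have hout1 : 1 ≤ out.length := List.length_pos_of_ne_nil h
    have hl : out.length - 1 < out.length := by omega
    have hlen : out.length < (out ++ c :: rest).length := by simp
    rw [pvLoopA, dif_pos hlen]
    simp only [pvGetD_mid, pvGetD_prev out (c :: rest) h, List.foldl_cons,
      pvStepCore, h, false_or, ← pvFindBoundary_eq]
    split_ifs with h1 h2 h3 h4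
    · -- small-enough chunk: append
      rw [List.append_cons, show out.length + 1 = (out ++ [c]).length by simp]
      exact ih _ (by simp)
    · -- merge into the previous chunk
      have hset : (out ++ c :: rest).set (out.length - 1)
            (PySem.Str.strip (out.getLastD "" ++ "\n\n" ++ c))
          = (out.dropLast ++ [PySem.Str.strip (out.getLastD "" ++ "\n\n" ++ c)]) ++ c :: rest := by
        rw [List.set_append, if_pos hl, pvSet_last out _ h]
      have hlen2 : (out.dropLast ++ [PySem.Str.strip (out.getLastD "" ++ "\n\n" ++ c)]).length
          = out.length := by simp; omega
      rw [hset, ← hlen2, pvEraseIdx_boundary]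
      simp only [List.eraseIdx_cons_zero]
      exact ih _ (by simp)
    · -- split the combined text
      rw [List.set_append, if_pos hl, pvSet_last out _ h, List.set_append]
      have hlen2 : ∀ v : String, (out.dropLast ++ [v]).length = out.length := by
        intro v; simp; omega
      rw [if_neg (by rw [hlen2]; exact lt_irrefl _), hlen2]
      simp only [Nat.sub_self, List.set_cons_zero]
      rw [show (out.dropLast ++ [PySem.Str.strip (PySem.Str.slice
              (PySem.Str.strip (out.getLastD "" ++ "\n\n" ++ c)) none
              (some (pvFindBoundaryA (PySem.Str.strip (out.getLastD "" ++ "\n\n" ++ c)))))]) ++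
            PySem.Str.strip (PySem.Str.slice
              (PySem.Str.strip (out.getLastD "" ++ "\n\n" ++ c))
              (some (pvFindBoundaryA (PySem.Str.strip (out.getLastD "" ++ "\n\n" ++ c)))) none) :: rest
          = (out.dropLast ++ [PySem.Str.strip (PySem.Str.slice
              (PySem.Str.strip (out.getLastD "" ++ "\n\n" ++ c)) none
              (some (pvFindBoundaryA (PySem.Str.strip (out.getLastD "" ++ "\n\n" ++ c))))),
              PySem.Str.strip (PySem.Str.slice
              (PySem.Str.strip (out.getLastD "" ++ "\n\n" ++ c))
              (some (pvFindBoundaryA (PySem.Str.strip (out.getLastD "" ++ "\n\n" ++ c)))) none)]) ++ rest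
        by simp]
      rw [show out.length + 1 = (out.dropLast ++ [PySem.Str.strip (PySem.Str.slice
              (PySem.Str.strip (out.getLastD "" ++ "\n\n" ++ c)) none
              (some (pvFindBoundaryA (PySem.Str.strip (out.getLastD "" ++ "\n\n" ++ c))))),
              PySem.Str.strip (PySem.Str.slice
              (PySem.Str.strip (out.getLastD "" ++ "\n\n" ++ c))
              (some (pvFindBoundaryA (PySem.Str.strip (out.getLastD "" ++ "\n\n" ++ c)))) none)]).length
        by simp; omega]
      exact ih _ (by simp)
    · -- split rejected: append
      rw [List.append_cons, show out.length + 1 = (out ++ [c]).length by simp]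
      exact ih _ (by simp)
    · -- no balanced boundary: append
      rw [List.append_cons, show out.length + 1 = (out ++ [c]).length by simp]
      exact ih _ (by simp)

-- B skips exactly the chunks A's initial comprehension filters out
theorem pvFoldl_stepB (chunks : List String) : ∀ s,
    chunks.foldl pvStepB s
      = ((chunks.map (fun c => PySem.Str.strip c)).filter (fun c => c ≠ "")).foldl pvStepCore s := by
  induction chunks with
  | nil => intro s; rfl
  | cons ch t ih =>
    intro s
    simp only [List.foldl_cons, List.map_cons, List.filter_cons]
    by_cases he : PySem.Str.strip ch = ""
    · simp [pvStepB, he, ih]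
    · simp [pvStepB, he, ih]

-- ===== VERDICT (by name: the statement is the Claim_ definition above) =====
theorem rebalance_small_chunks_spec : Claim_equal_rebalance_small_chunks := by
  unfold Claim_equal_rebalance_small_chunks Spec_rebalance_small_chunks
  intro chunks _
  show pvLoopA ((chunks.map (fun c => PySem.Str.strip c)).filter (fun c => c ≠ "")) 1
      = chunks.foldl pvStepB []
  rw [pvFoldl_stepB]
  cases hb : (chunks.map (fun c => PySem.Str.strip c)).filter (fun c => c ≠ "") with
  | nil => rw [pvLoopA]; rfl
  | cons c rest =>
    have h1 := pvLoop_eq rest [c] (by simp)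
    simp only [List.singleton_append, List.length_cons, List.length_nil] at h1
    rw [List.foldl_cons, show pvStepCore [] c = [c] from by simp [pvStepCore]]
    exact h1
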